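-- pv_equiv track=rewrite | github.com/AlexOrlek/figleaf_fasta | figleaf_fasta/utils.py | indices_to_slices
-- ===== SOURCE A (Python) =====
-- from itertools import groupby
--
-- def indices_to_slices(indices):
--     """Convert a list of indices to a list of nested lists containing slices, using itertools.groupby
--
--     Args:
--         indices (list): Sorted list of integer positions
--
--     Returns:
--         slices (list): List of nested lists with start, end positions
--
--     """
--     slices = []
--     for key, it in groupby(enumerate(indices), lambda x: x[1] - x[0]):
--         indices = [y for x, y in it]
--         if len(indices) == 1:
--             slices.append([indices[0], indices[0] + 1])
--         else:
--             slices.append([indices[0], indices[-1] + 1])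
--     return slices
-- ===== SOURCE B (Python) =====
-- def indices_to_slices(indices):
--     """Convert a list of indices to a list of nested lists containing slices.
--
--     Single explicit pass maintaining the start of the current run and the
--     previous value seen; emits [start, prev + 1] whenever the run breaks.
--     """
--     slices = []
--     if not indices:
--         return slices
--     start = prev = indices[0]
--     for value in indices[1:]:
--         if value == prev + 1:
--             prev = value
--         else:
--             slices.append([start, prev + 1])
--             start = prev = value
--     slices.append([start, prev + 1])
--     return slices
-- ===== Notes on version B (the rewrite author's own statement) =====
-- stated objective: simpler
-- what changed: Replaces the groupby-over-enumerate decomposition (building the key value-index, materializing each group as a list, then inspecting its length and endpoints) with one explicit pass that maintains only the running state start/prev and emits [start, prev+1] at each run break.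
import Mathlib
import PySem

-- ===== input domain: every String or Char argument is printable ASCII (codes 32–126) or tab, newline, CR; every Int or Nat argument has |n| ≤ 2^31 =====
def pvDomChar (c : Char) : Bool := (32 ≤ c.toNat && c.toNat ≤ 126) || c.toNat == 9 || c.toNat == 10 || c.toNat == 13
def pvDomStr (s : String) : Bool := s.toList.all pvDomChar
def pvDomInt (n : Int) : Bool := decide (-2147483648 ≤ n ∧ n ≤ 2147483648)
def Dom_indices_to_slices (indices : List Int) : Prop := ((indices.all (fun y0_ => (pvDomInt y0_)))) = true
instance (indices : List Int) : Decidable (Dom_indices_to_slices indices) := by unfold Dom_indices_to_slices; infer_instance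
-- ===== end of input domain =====

-- B replaces A's groupby-over-enumerate decomposition with one explicit pass keeping only start/prev running state (objective: simpler).


-- ===== PORT A =====
-- groupby's consumption of one group: take the maximal prefix of the enumerated
-- tail whose key (value - index) equals k, returning the group's values and the rest.
def itsChunk (k : Int) : List (Int × Int) → List Int × List (Int × Int)
  | [] => ([], [])
  | (i, v) :: rest =>
    if v - i = k then ((itsChunk k rest).1.cons v, (itsChunk k rest).2)
    else ([], (i, v) :: rest)

theorem itsChunk_len (k : Int) : ∀ l : List (Int × Int), (itsChunk k l).2.length ≤ l.length
  | [] => by simp [itsChunk]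
  | (i, v) :: rest => by
    simp only [itsChunk]
    split
    · exact Nat.le_succ_of_le (itsChunk_len k rest)
    · simp

-- the successive groups (lists of values) produced by groupby on the enumerated list
def itsRuns : List (Int × Int) → List (List Int)
  | [] => []
  | (i, v) :: rest =>
    (v :: (itsChunk (v - i) rest).1) :: itsRuns (itsChunk (v - i) rest).2
termination_by l => l.length
decreasing_by
  simp only [List.length_cons]
  exact Nat.lt_succ_of_le (itsChunk_len _ rest)

def indices_to_slices (indices : List Int) : List (List Int) :=
  (itsRuns (PySem.List.enumerate indices 0)).map (fun g =>
    if g.length = 1 then [g.head!, g.head! + 1] else [g.head!, g.getLast! + 1])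

-- ===== PORT B =====
def itsLoop : List Int → Int → Int → List (List Int) → List (List Int)
  | [], start, prev, acc => acc ++ [[start, prev + 1]]
  | v :: vs, start, prev, acc =>
    if v = prev + 1 then itsLoop vs start v acc
    else itsLoop vs v v (acc ++ [[start, prev + 1]])

def indices_to_slices_alt : List Int → List (List Int)
  | [] => []
  | x :: xs => itsLoop xs x x []

-- ===== PRECONDITION & SPEC =====
def Spec_indices_to_slices (indices : List Int) (out : List (List Int)) : Prop := out = indices_to_slices_alt indices
instance (indices : List Int) (out : List (List Int)) : Decidable (Spec_indices_to_slices indices out) := by unfold Spec_indices_to_slices; infer_instance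

-- ===== CLAIM (what is proved, stated in full; the proofs are below) =====
def Claim_equal_indices_to_slices : Prop := ∀ (indices : List Int), Dom_indices_to_slices indices → Spec_indices_to_slices indices (indices_to_slices indices)

-- ===== LEMMAS AND PROOFS =====
def itsF (g : List Int) : List Int :=
  if g.length = 1 then [g.head!, g.head! + 1] else [g.head!, g.getLast! + 1]

theorem itsF_cons (v : Int) (g : List Int) : itsF (v :: g) = [v, (v :: g).getLast! + 1] := by
  cases g with
  | nil => simp [itsF]
  | cons w ws => simp [itsF]

theorem itsLoop_eq (vs : List Int) : ∀ (i start prev : Int) (acc : List (List Int)),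
    itsLoop vs start prev acc
      = acc ++ ([start, (prev :: (itsChunk (prev - i) (PySem.List.enumerate vs (i + 1))).1).getLast! + 1]
          :: (itsRuns (itsChunk (prev - i) (PySem.List.enumerate vs (i + 1))).2).map itsF) := by
  induction vs with
  | nil => intro i start prev acc; simp [itsLoop, itsChunk, itsRuns, PySem.List.enumerate_nil]
  | cons v vs ih =>
    intro i start prev acc
    rw [PySem.List.enumerate_cons]
    by_cases h : v = prev + 1
    · have hk : v - (i + 1) = prev - i := by omega
      have hc : itsChunk (prev - i) ((i + 1, v) :: PySem.List.enumerate vs (i + 1 + 1)) =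
          (v :: (itsChunk (prev - i) (PySem.List.enumerate vs (i + 1 + 1))).1,
           (itsChunk (prev - i) (PySem.List.enumerate vs (i + 1 + 1))).2) := by
        simp [itsChunk, hk]
      simp only [itsLoop, if_pos h]
      rw [ih (i + 1) start v acc, hk, hc]
      congr 2
    · have hk : ¬ (v - (i + 1) = prev - i) := by omega
      simp only [itsLoop, if_neg h, itsChunk, if_neg hk]
      rw [ih (i + 1) v v (acc ++ [[start, prev + 1]])]
      simp only [itsRuns, List.map_cons, itsF_cons]
      simp

theorem itsLoop_eq' (x : Int) (xs : List Int) :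
    indices_to_slices_alt (x :: xs) = (itsRuns (PySem.List.enumerate (x :: xs) 0)).map itsF := by
  show itsLoop xs x x [] = _
  rw [PySem.List.enumerate_cons, itsLoop_eq xs 0 x x []]
  simp only [itsRuns, List.map_cons, itsF_cons]
  norm_num

-- ===== VERDICT (by name: the statement is the Claim_ definition above) =====
theorem indices_to_slices_spec : Claim_equal_indices_to_slices := by
  intro indices _
  show indices_to_slices indices = indices_to_slices_alt indices
  cases indices with
  | nil => simp [indices_to_slices, indices_to_slices_alt, PySem.List.enumerate_nil, itsRuns]
  | cons x xs =>
    rw [itsLoop_eq' x xs]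
    rfl
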